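-- pv_equiv track=rewrite | github.com/bryanhooi/pycharm-programs | qualifier.py | longest_word_length
-- ===== SOURCE A (Python) =====
-- def longest_word_length(words, labels=None):
--     lengths = []
--
--     if labels is None:
--         for col in range(len(words[0])):
--             col_longest = 0
--
--             for row in range(len(words)):
--                 word_length = len(str(words[row][col]))
--                 if word_length > col_longest:
--                     col_longest = word_length
--
--             lengths.append(col_longest)
--
--     else:
--         for col in range(len(words[0])):
--             col_longest = 0
--
--             for row in range(len(words)):
--                 word_length = len(str(words[row][col]))
--                 if word_length > col_longest:
--                     col_longest = word_length
--
--             if len(str(labels[col])) > col_longest: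
--                 col_longest = len(str(labels[col]))
--             lengths.append(col_longest)
--
--     return lengths
-- ===== SOURCE B (Python) =====
-- def longest_word_length(words, labels=None):
--     n = len(words[0])
--     if labels is None:
--         lengths = [0] * n
--     else:
--         lengths = [len(str(labels[col])) for col in range(n)]
--     for row in words:
--         lengths = [max(l, len(str(w))) for l, w in zip(lengths, row)]
--     return lengths
-- ===== Notes on version B (the rewrite author's own statement) =====
-- stated objective: alternative
-- what changed: Replaced the column-major nested scans (inner loop re-scanning all rows per column, appending one maximum at a time, with a post-hoc label check) by a single row-major pass that seeds a per-column accumulator from the label lengths and updates it with a pointwise zip/max against each row.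
import Mathlib
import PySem

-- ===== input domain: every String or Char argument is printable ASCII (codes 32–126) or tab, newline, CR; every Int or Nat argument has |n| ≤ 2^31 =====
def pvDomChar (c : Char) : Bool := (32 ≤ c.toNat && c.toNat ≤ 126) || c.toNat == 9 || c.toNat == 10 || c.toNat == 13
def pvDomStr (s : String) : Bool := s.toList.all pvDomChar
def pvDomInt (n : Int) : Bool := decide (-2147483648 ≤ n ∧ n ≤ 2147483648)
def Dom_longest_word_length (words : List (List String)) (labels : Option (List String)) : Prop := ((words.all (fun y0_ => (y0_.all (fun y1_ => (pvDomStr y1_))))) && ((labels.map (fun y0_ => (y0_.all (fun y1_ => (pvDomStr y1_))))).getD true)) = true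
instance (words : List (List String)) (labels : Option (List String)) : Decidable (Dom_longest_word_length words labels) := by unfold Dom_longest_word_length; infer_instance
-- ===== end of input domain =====

-- ===== PORT A =====
-- B replaces A's column-major nested scans by one row-major pass over a per-column
-- accumulator seeded from the label lengths (objective: alternative decomposition, same cost).
def longest_word_length (words : List (List String)) (labels : Option (List String)) : List Int :=
  match labels with
  | none =>
      (PySem.List.pyRange 0 (PySem.List.len (PySem.List.pyGetD words 0 []))).foldl
        (fun lengths col =>
          let colLongest :=
            (PySem.List.pyRange 0 (PySem.List.len words)).foldl
              (fun colLongest row =>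
                let wordLength :=
                  PySem.Str.len (PySem.List.pyGetD (PySem.List.pyGetD words row []) col "")
                if wordLength > colLongest then wordLength else colLongest) 0
          lengths ++ [colLongest]) []
  | some ls =>
      (PySem.List.pyRange 0 (PySem.List.len (PySem.List.pyGetD words 0 []))).foldl
        (fun lengths col =>
          let colLongest :=
            (PySem.List.pyRange 0 (PySem.List.len words)).foldl
              (fun colLongest row =>
                let wordLength :=
                  PySem.Str.len (PySem.List.pyGetD (PySem.List.pyGetD words row []) col "")
                if wordLength > colLongest then wordLength else colLongest) 0
          let colLongest :=
            if PySem.Str.len (PySem.List.pyGetD ls col "") > colLongest then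
              PySem.Str.len (PySem.List.pyGetD ls col "")
            else colLongest
          lengths ++ [colLongest]) []

-- ===== PORT B =====
def longest_word_length_alt (words : List (List String)) (labels : Option (List String)) : List Int :=
  let n := PySem.List.len (PySem.List.pyGetD words 0 [])
  let lengths : List Int :=
    match labels with
    | none => List.replicate n.toNat 0
    | some ls => (PySem.List.pyRange 0 n).map (fun col => PySem.Str.len (PySem.List.pyGetD ls col ""))
  words.foldl
    (fun lengths row => (lengths.zip row).map (fun p => max p.1 (PySem.Str.len p.2)))
    lengths

-- ===== PRECONDITION & SPEC =====
-- Pre_ excludes exactly the inputs where Python A raises IndexError: words empty (words[0]),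
-- some row shorter than the first row, or labels shorter than the first row.
def Pre_longest_word_length (words : List (List String)) (labels : Option (List String)) : Prop :=
  words ≠ [] ∧
  (∀ r ∈ words, (words.headD []).length ≤ r.length) ∧
  (∀ ls, labels = some ls → (words.headD []).length ≤ ls.length)

instance (words : List (List String)) (labels : Option (List String)) :
    Decidable (Pre_longest_word_length words labels) := by
  unfold Pre_longest_word_length; infer_instance

def pvWitness_longest_word_length : List (List String) × Option (List String) :=
  ([["ab", "c"], ["d", "efg"]], some ["id", "name"])

def Spec_longest_word_length (words : List (List String)) (labels : Option (List String)) (out : List Int) : Prop := out = longest_word_length_alt words labels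
instance (words : List (List String)) (labels : Option (List String)) (out : List Int) : Decidable (Spec_longest_word_length words labels out) := by unfold Spec_longest_word_length; infer_instance

-- ===== CLAIM (what is proved, stated in full; the proofs are below) =====
def Claim_equal_longest_word_length : Prop := ∀ (words : List (List String)) (labels : Option (List String)), Dom_longest_word_length words labels → Pre_longest_word_length words labels → Spec_longest_word_length words labels (longest_word_length words labels)

-- ===== LEMMAS AND PROOFS =====

-- string lengths are nonnegative
theorem pvLenNonneg (s : String) : 0 ≤ PySem.Str.len s := by
  simp [PySem.Str.len_eq]

-- max written as A writes it
theorem pvIfMax (a b : Int) : (if b > a then b else a) = max a b := by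
  split <;> omega

-- a fold of maxima from a nonnegative start equals max of the start and the fold from 0
theorem pvFoldMaxShift (g : List String → Int) (hg : ∀ r, 0 ≤ g r) :
    ∀ (ws : List (List String)) (a : Int), 0 ≤ a →
      ws.foldl (fun acc r => max acc (g r)) a =
        max a (ws.foldl (fun acc r => max acc (g r)) 0) := by
  intro ws
  induction ws with
  | nil => intro a ha; simp; omega
  | cons r t ih =>
      intro a ha
      simp only [List.foldl_cons]
      rw [ih (max a (g r)) (le_trans ha (le_max_left _ _)),
          ih (max 0 (g r)) (le_max_left _ _)]
      have := hg r
      omega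

-- one zip/max step updates each column of the accumulator pointwise
theorem pvStepGetD (init : List Int) (r : List String) (c : Nat)
    (hc : c < init.length) (hr : init.length ≤ r.length) :
    ((init.zip r).map (fun p => max p.1 (PySem.Str.len p.2))).getD c 0 =
      max (init.getD c 0) (PySem.Str.len (r.getD c "")) := by
  have hcz : c < (init.zip r).length := by simp [List.length_zip]; omega
  have hcr : c < r.length := lt_of_lt_of_le hc hr
  rw [List.getD_eq_getElem _ _ (by simpa using hcz),
      List.getD_eq_getElem _ _ hc, List.getD_eq_getElem _ _ hcr]
  simp

theorem pvStepLen (init : List Int) (r : List String) (hr : init.length ≤ r.length) :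
    ((init.zip r).map (fun p => max p.1 (PySem.Str.len p.2))).length = init.length := by
  simp [List.length_zip]; omega

-- B's fold characterised column-wise
theorem pvBFold (N : Nat) :
    ∀ (ws : List (List String)) (init : List Int), init.length = N →
      (∀ r ∈ ws, N ≤ r.length) →
      ws.foldl (fun lengths row => (lengths.zip row).map (fun p => max p.1 (PySem.Str.len p.2))) init =
        (List.range N).map (fun c =>
          ws.foldl (fun acc r => max acc (PySem.Str.len (r.getD c ""))) (init.getD c 0)) := by
  intro ws
  induction ws with
  | nil =>
      intro init hlen _
      simp only [List.foldl_nil]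
      apply List.ext_getElem (by simp [hlen])
      intro i h1 h2
      simp only [List.getElem_map, List.getElem_range]
      rw [List.getD_eq_getElem _ _ h1]
  | cons r t ih =>
      intro init hlen hrows
      simp only [List.foldl_cons]
      rw [ih _ (by rw [pvStepLen init r (by rw [hlen]; exact hrows r (by simp))]; exact hlen)
            (fun x hx => hrows x (by simp [hx]))]
      apply List.map_congr_left
      intro c hc
      rw [pvStepGetD init r c (by rw [hlen]; exact List.mem_range.mp hc)
            (by rw [hlen]; exact hrows r (by simp))]

-- A's inner loop over row indices is a fold over the rows themselves
theorem pvAInner (words : List (List String)) (col : Int) :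
    (PySem.List.pyRange 0 (PySem.List.len words)).foldl
      (fun colLongest row =>
        max colLongest (PySem.Str.len (PySem.List.pyGetD (PySem.List.pyGetD words row []) col ""))) 0 =
    words.foldl (fun acc r => max acc (PySem.Str.len (PySem.List.pyGetD r col ""))) 0 := by
  simp only [PySem.List.len]
  exact PySem.List.foldl_pyRange_zero_pyGetD' words []
    (fun acc r => max acc (PySem.Str.len (PySem.List.pyGetD r col ""))) 0

-- the headD length as pyGetD, for nonempty words
theorem pvHead (words : List (List String)) (h : words ≠ []) :
    PySem.List.pyGetD words 0 [] = words.headD [] := by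
  cases words with
  | nil => simp at h
  | cons a t => simp [PySem.List.pyGetD_zero_cons]

-- ===== VERDICT (by name: the statement is the Claim_ definition above) =====
theorem longest_word_length_spec : Claim_equal_longest_word_length := by
  intro words labels _ hpre
  obtain ⟨hne, hrows, hlab⟩ := hpre
  unfold Spec_longest_word_length longest_word_length longest_word_length_alt
  simp only [pvHead words hne]
  set N := (words.headD []).length with hN
  have hlen : PySem.List.len (words.headD []) = (N : Int) := by
    simp [PySem.List.len, hN]
  rw [hlen]
  simp only [Int.toNat_natCast]
  cases labels with
  | none =>
      simp only []
      rw [PySem.List.foldl_append_singleton_eq_map, List.nil_append,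
          PySem.List.pyRange_zero_natCast, List.map_map,
          pvBFold N words (List.replicate N 0) (by simp) hrows]
      apply List.map_congr_left
      intro c hc
      have hc' := List.mem_range.mp hc
      simp only [Function.comp, pvIfMax, pvAInner]
      rw [List.getD_eq_getElem _ _ (by simpa using hc')]
      simp only [List.getElem_replicate]
      apply PySem.List.foldl_congr_mem
      intro acc x _
      rw [PySem.List.pyGetD_natCast]
  | some ls =>
      simp only []
      rw [PySem.List.foldl_append_singleton_eq_map, List.nil_append,
          PySem.List.pyRange_zero_natCast, List.map_map,
          pvBFold N words _ (by simp) hrows]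
      apply List.map_congr_left
      intro c hc
      have hc' := List.mem_range.mp hc
      simp only [Function.comp, pvIfMax, pvAInner]
      rw [← PySem.List.pyRange_zero_natCast]
      have hinit := PySem.List.pyGetD_map_pyRange
        (fun col => PySem.Str.len (PySem.List.pyGetD ls col "")) N c 0 hc'
      rw [PySem.List.pyGetD_natCast] at hinit
      rw [hinit]
      have hfold : words.foldl
          (fun acc r => max acc (PySem.Str.len (r.getD c ""))) (PySem.Str.len (PySem.List.pyGetD ls (c : Int) ""))
          = max (PySem.Str.len (PySem.List.pyGetD ls (c : Int) ""))
              (words.foldl (fun acc r => max acc (PySem.Str.len (r.getD c ""))) 0) := by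
        exact pvFoldMaxShift _ (fun r => pvLenNonneg _) words _ (pvLenNonneg _)
      rw [hfold]
      have heq : words.foldl (fun acc r => max acc (PySem.Str.len (PySem.List.pyGetD r (c : Int) ""))) 0
          = words.foldl (fun acc r => max acc (PySem.Str.len (r.getD c ""))) 0 := by
        apply PySem.List.foldl_congr_mem
        intro acc x _
        rw [PySem.List.pyGetD_natCast]
      rw [heq]
      omega
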